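-- pv_equiv track=rewrite | github.com/harsh901shah/finance-tracker | unused_files/parser.py | categorize_transaction
-- ===== SOURCE A (Python) =====
-- def categorize_transaction(description):
--     """
--     Automatically categorize a transaction based on its description
--     Simple rule-based categorization
--     """
--     description = description.lower()
--
--     # Food related
--     if any(keyword in description for keyword in ['restaurant', 'cafe', 'food', 'grocery', 'market', 'supermarket']):
--         return 'Food'
--
--     # Transportation
--     if any(keyword in description for keyword in ['gas', 'fuel', 'uber', 'lyft', 'taxi', 'transport', 'parking']):
--         return 'Transportation'
--
--     # Housing
--     if any(keyword in description for keyword in ['rent', 'mortgage', 'home', 'apartment', 'housing']):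
--         return 'Housing'
--
--     # Utilities
--     if any(keyword in description for keyword in ['electric', 'water', 'utility', 'internet', 'phone', 'bill']):
--         return 'Utilities'
--
--     # Entertainment
--     if any(keyword in description for keyword in ['movie', 'theatre', 'concert', 'netflix', 'spotify', 'entertainment']):
--         return 'Entertainment'
--
--     # Healthcare
--     if any(keyword in description for keyword in ['doctor', 'hospital', 'medical', 'pharmacy', 'health']):
--         return 'Healthcare'
--
--     # Education
--     if any(keyword in description for keyword in ['school', 'college', 'university', 'course', 'book', 'education']):
--         return 'Education'
--
--     # Shopping
--     if any(keyword in description for keyword in ['amazon', 'walmart', 'target', 'shop', 'store', 'purchase']):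
--         return 'Shopping'
--
--     # Income
--     if any(keyword in description for keyword in ['salary', 'paycheck', 'deposit', 'income']):
--         return 'Salary'
--
--     # Default
--     return 'Other'
-- ===== SOURCE B (Python) =====
-- CATEGORIES = ['Food', 'Transportation', 'Housing', 'Utilities', 'Entertainment',
--               'Healthcare', 'Education', 'Shopping', 'Salary']
--
-- # keyword -> priority (index into CATEGORIES); one flat map, not per-category groups
-- PRIORITY = {
--     'restaurant': 0, 'cafe': 0, 'food': 0, 'grocery': 0, 'market': 0, 'supermarket': 0,
--     'gas': 1, 'fuel': 1, 'uber': 1, 'lyft': 1, 'taxi': 1, 'transport': 1, 'parking': 1,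
--     'rent': 2, 'mortgage': 2, 'home': 2, 'apartment': 2, 'housing': 2,
--     'electric': 3, 'water': 3, 'utility': 3, 'internet': 3, 'phone': 3, 'bill': 3,
--     'movie': 4, 'theatre': 4, 'concert': 4, 'netflix': 4, 'spotify': 4, 'entertainment': 4,
--     'doctor': 5, 'hospital': 5, 'medical': 5, 'pharmacy': 5, 'health': 5,
--     'school': 6, 'college': 6, 'university': 6, 'course': 6, 'book': 6, 'education': 6,
--     'amazon': 7, 'walmart': 7, 'target': 7, 'shop': 7, 'store': 7, 'purchase': 7,
--     'salary': 8, 'paycheck': 8, 'deposit': 8, 'income': 8,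
-- }
--
-- def categorize_transaction(description):
--     # Single left-to-right scan of the description: at every position note which
--     # keywords start there and keep the minimum category priority seen so far.
--     description = description.lower()
--     best = len(CATEGORIES)
--     for i in range(len(description)):
--         for kw, pri in PRIORITY.items():
--             if pri < best and description.startswith(kw, i):
--                 best = pri
--     return CATEGORIES[best] if best < len(CATEGORIES) else 'Other'
-- ===== Notes on version B (the rewrite author's own statement) =====
-- stated objective: alternative
-- what changed: Instead of testing each category's keyword group against the whole string with substring membership, B makes a single left-to-right scan over the string positions, checking which keywords start at each position and keeping the minimum category priority in an accumulator; the answer is the category of that minimum (or Other).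
import Mathlib
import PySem

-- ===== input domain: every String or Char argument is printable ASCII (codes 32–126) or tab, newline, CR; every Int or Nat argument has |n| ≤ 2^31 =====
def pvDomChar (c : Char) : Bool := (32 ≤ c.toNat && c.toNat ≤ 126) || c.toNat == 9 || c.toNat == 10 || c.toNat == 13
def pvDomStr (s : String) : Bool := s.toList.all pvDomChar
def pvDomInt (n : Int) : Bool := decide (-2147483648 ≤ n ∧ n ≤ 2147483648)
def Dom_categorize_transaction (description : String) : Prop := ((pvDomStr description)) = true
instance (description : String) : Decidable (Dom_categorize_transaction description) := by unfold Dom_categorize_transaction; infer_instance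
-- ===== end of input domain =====

-- B replaces A's per-category 'any keyword in description' checks by a single positional scan
-- keeping the minimum keyword priority in an accumulator (objective: alternative algorithm).


-- ===== PORT A =====
def categorize_transaction (description : String) : String :=
  let d := PySem.Str.lower description
  if ["restaurant", "cafe", "food", "grocery", "market", "supermarket"].any
      (fun kw => PySem.Str.isIn kw d) then "Food"
  else if ["gas", "fuel", "uber", "lyft", "taxi", "transport", "parking"].any
      (fun kw => PySem.Str.isIn kw d) then "Transportation"
  else if ["rent", "mortgage", "home", "apartment", "housing"].any
      (fun kw => PySem.Str.isIn kw d) then "Housing"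
  else if ["electric", "water", "utility", "internet", "phone", "bill"].any
      (fun kw => PySem.Str.isIn kw d) then "Utilities"
  else if ["movie", "theatre", "concert", "netflix", "spotify", "entertainment"].any
      (fun kw => PySem.Str.isIn kw d) then "Entertainment"
  else if ["doctor", "hospital", "medical", "pharmacy", "health"].any
      (fun kw => PySem.Str.isIn kw d) then "Healthcare"
  else if ["school", "college", "university", "course", "book", "education"].any
      (fun kw => PySem.Str.isIn kw d) then "Education"
  else if ["amazon", "walmart", "target", "shop", "store", "purchase"].any
      (fun kw => PySem.Str.isIn kw d) then "Shopping"
  else if ["salary", "paycheck", "deposit", "income"].any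
      (fun kw => PySem.Str.isIn kw d) then "Salary"
  else "Other"

-- ===== PORT B =====
def pvCategories : List String :=
  ["Food", "Transportation", "Housing", "Utilities", "Entertainment",
   "Healthcare", "Education", "Shopping", "Salary"]

-- keyword -> priority map (Python dict in insertion order)
def pvPriority : List (String × Nat) :=
  [("restaurant", 0), ("cafe", 0), ("food", 0), ("grocery", 0), ("market", 0), ("supermarket", 0),
   ("gas", 1), ("fuel", 1), ("uber", 1), ("lyft", 1), ("taxi", 1), ("transport", 1), ("parking", 1),
   ("rent", 2), ("mortgage", 2), ("home", 2), ("apartment", 2), ("housing", 2),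
   ("electric", 3), ("water", 3), ("utility", 3), ("internet", 3), ("phone", 3), ("bill", 3),
   ("movie", 4), ("theatre", 4), ("concert", 4), ("netflix", 4), ("spotify", 4), ("entertainment", 4),
   ("doctor", 5), ("hospital", 5), ("medical", 5), ("pharmacy", 5), ("health", 5),
   ("school", 6), ("college", 6), ("university", 6), ("course", 6), ("book", 6), ("education", 6),
   ("amazon", 7), ("walmart", 7), ("target", 7), ("shop", 7), ("store", 7), ("purchase", 7),
   ("salary", 8), ("paycheck", 8), ("deposit", 8), ("income", 8)]

-- the loop 'for i in range(len(d)): for kw, pri in PRIORITY.items(): …' as recursion over suffixes;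
-- d.startswith(kw, i) is 'startswith (d.drop i) kw', i.e. startswith on the current suffix
def pvScan : List Char → Nat → Nat
  | [], best => best
  | c :: rest, best =>
      pvScan rest (pvPriority.foldl (fun b kp =>
        if kp.2 < b && PySem.Chars.startswith (c :: rest) kp.1.toList then kp.2 else b) best)

def categorize_transaction_alt (description : String) : String :=
  let best := pvScan (PySem.Str.lower description).toList pvCategories.length
  if best < pvCategories.length then pvCategories.getD best "Other" else "Other"

-- ===== PRECONDITION & SPEC =====
def Spec_categorize_transaction (description : String) (out : String) : Prop :=
  out = categorize_transaction_alt description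
instance (description : String) (out : String) : Decidable (Spec_categorize_transaction description out) := by
  unfold Spec_categorize_transaction; infer_instance

-- ===== CLAIM =====
def Claim_equal_categorize_transaction : Prop :=
  ∀ (description : String), Dom_categorize_transaction description →
    Spec_categorize_transaction description (categorize_transaction description)

-- ===== LEMMAS AND PROOFS =====

-- the inner fold over the keyword map never increases the accumulator
theorem pvFold_le (s : List Char) (l : List (String × Nat)) (b : Nat) :
    l.foldl (fun b kp =>
      if kp.2 < b && PySem.Chars.startswith s kp.1.toList then kp.2 else b) b ≤ b := by
  induction l generalizing b with
  | nil => exact le_refl b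
  | cons kp l ih =>
      simp only [List.foldl_cons]
      refine le_trans (ih _) ?_
      split
      · next h => exact le_of_lt (of_decide_eq_true ((Bool.and_eq_true _ _).mp h).1)
      · exact le_refl b

-- if some listed keyword starts the suffix s, the fold result is ≤ its priority
theorem pvFold_le_of_mem (s : List Char) (l : List (String × Nat)) (b : Nat)
    (kw : String) (p : Nat) (hm : (kw, p) ∈ l)
    (hs : PySem.Chars.startswith s kw.toList = true) :
    l.foldl (fun b kp =>
      if kp.2 < b && PySem.Chars.startswith s kp.1.toList then kp.2 else b) b ≤ p := by
  induction l generalizing b with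
  | nil => cases hm
  | cons kp l ih =>
      simp only [List.foldl_cons]
      rcases List.mem_cons.mp hm with h | h
      · cases h
        by_cases hlt : p < b
        · simp only [hlt, hs, decide_true, Bool.and_self, if_true]
          exact pvFold_le s l p
        · refine le_trans (pvFold_le s l _) ?_
          split
          · exact le_refl _
          · omega
      · exact ih _ h

-- the fold result is the accumulator or the priority of a keyword starting the suffix
theorem pvFold_cases (s : List Char) (l : List (String × Nat)) (b : Nat) :
    l.foldl (fun b kp =>
      if kp.2 < b && PySem.Chars.startswith s kp.1.toList then kp.2 else b) b = b ∨
    ∃ kw p, (kw, p) ∈ l ∧ PySem.Chars.startswith s kw.toList = true ∧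
      l.foldl (fun b kp =>
        if kp.2 < b && PySem.Chars.startswith s kp.1.toList then kp.2 else b) b = p := by
  induction l generalizing b with
  | nil => exact Or.inl rfl
  | cons kp l ih =>
      simp only [List.foldl_cons]
      rcases ih (if kp.2 < b && PySem.Chars.startswith s kp.1.toList then kp.2 else b) with h | h
      · rw [h]
        split
        · next hc =>
            exact Or.inr ⟨kp.1, kp.2, List.mem_cons_self .., ((Bool.and_eq_true _ _).mp hc).2, rfl⟩
        · exact Or.inl rfl
      · rcases h with ⟨kw, p, hm, hs, he⟩
        exact Or.inr ⟨kw, p, List.mem_cons_of_mem _ hm, hs, he⟩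

theorem pvScan_le (s : List Char) (b : Nat) : pvScan s b ≤ b := by
  induction s generalizing b with
  | nil => exact le_refl b
  | cons c rest ih => exact le_trans (ih _) (pvFold_le _ _ _)

-- every keyword is nonempty
set_option maxRecDepth 200000 in
theorem pvPriority_ne_nil : ∀ kp ∈ pvPriority, kp.1.toList ≠ [] := by decide

-- completeness: an occurring keyword bounds the scan result by its priority
theorem pvScan_le_of_infix (s : List Char) (b : Nat) (kw : String) (p : Nat)
    (hm : (kw, p) ∈ pvPriority) (hi : kw.toList <:+: s) : pvScan s b ≤ p := by
  induction s generalizing b with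
  | nil =>
      exact absurd (List.infix_nil.mp hi) (pvPriority_ne_nil _ hm)
  | cons c rest ih =>
      rcases List.infix_cons_iff.mp hi with h | h
      · have hs : PySem.Chars.startswith (c :: rest) kw.toList = true :=
          (PySem.Chars.startswith_iff _ _).mpr h
        simp only [pvScan]
        exact le_trans (pvScan_le _ _) (pvFold_le_of_mem _ _ _ _ _ hm hs)
      · exact ih _ h

-- soundness: the scan result is the start value or the priority of an occurring keyword
theorem pvScan_cases (s : List Char) (b : Nat) :
    pvScan s b = b ∨
    ∃ kw p, (kw, p) ∈ pvPriority ∧ kw.toList <:+: s ∧ pvScan s b = p := by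
  induction s generalizing b with
  | nil => exact Or.inl rfl
  | cons c rest ih =>
      simp only [pvScan]
      rcases ih (pvPriority.foldl (fun b kp =>
          if kp.2 < b && PySem.Chars.startswith (c :: rest) kp.1.toList then kp.2 else b) b) with h | h
      · rw [h]
        rcases pvFold_cases (c :: rest) pvPriority b with h2 | h2
        · exact Or.inl h2
        · rcases h2 with ⟨kw, p, hm, hs, he⟩
          exact Or.inr ⟨kw, p, hm, ((PySem.Chars.startswith_iff _ _).mp hs).isInfix, he⟩
      · rcases h with ⟨kw, p, hm, hi, he⟩
        exact Or.inr ⟨kw, p, hm, hi.trans ((List.suffix_cons c rest).isInfix), he⟩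

-- all priorities are < 9
set_option maxRecDepth 200000 in
theorem pvPriority_lt : ∀ kp ∈ pvPriority, kp.2 < 9 := by decide

-- A's group-c condition ↔ some priority-c keyword occurs
theorem pvCond_iff (d : String) (g : List String) (p : Nat)
    (hg : (pvPriority.filter (fun kp => kp.2 == p)).map Prod.fst = g) :
    (g.any (fun kw => PySem.Str.isIn kw d)) = true ↔
      ∃ kw, (kw, p) ∈ pvPriority ∧ kw.toList <:+: d.toList := by
  subst hg
  constructor
  · intro h
    rcases List.any_eq_true.mp h with ⟨kw, hmem, hin⟩
    rcases List.mem_map.mp hmem with ⟨kp, hf, hfst⟩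
    have hfil := List.mem_filter.mp hf
    have hp : kp.2 = p := by simpa using hfil.2
    refine ⟨kw, ?_, (PySem.Str.isIn_iff_infix _ _).mp hin⟩
    have : kp = (kw, p) := by cases kp; simp_all
    exact this ▸ hfil.1
  · rintro ⟨kw, hm, hi⟩
    refine List.any_eq_true.mpr ⟨kw, ?_, (PySem.Str.isIn_iff_infix _ _).mpr hi⟩
    exact List.mem_map.mpr ⟨(kw, p), List.mem_filter.mpr ⟨hm, by simp⟩, rfl⟩

-- if a priority-c keyword occurs and no keyword of smaller priority does, the scan yields c
theorem pvScan_eq (l : List Char) (c : Nat) (hc : c < 9)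
    (hocc : ∃ kw, (kw, c) ∈ pvPriority ∧ kw.toList <:+: l)
    (hnone : ∀ p, p < c → ¬ ∃ kw, (kw, p) ∈ pvPriority ∧ kw.toList <:+: l) :
    pvScan l 9 = c := by
  rcases hocc with ⟨kw, hm, hi⟩
  have hle : pvScan l 9 ≤ c := pvScan_le_of_infix l 9 kw c hm hi
  rcases pvScan_cases l 9 with h | ⟨kw', p, hm', hi', he⟩
  · omega
  · have hp : ¬ p < c := fun hlt => hnone p hlt ⟨kw', hm', hi'⟩
    omega

-- if no keyword occurs at all, the scan yields 9
theorem pvScan_eq_nine (l : List Char)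
    (hnone : ∀ p, p < 9 → ¬ ∃ kw, (kw, p) ∈ pvPriority ∧ kw.toList <:+: l) :
    pvScan l 9 = 9 := by
  rcases pvScan_cases l 9 with h | ⟨kw, p, hm, hi, he⟩
  · exact h
  · exact absurd ⟨kw, hm, hi⟩ (hnone p (pvPriority_lt _ hm))

-- ===== VERDICT =====
theorem categorize_transaction_spec : Claim_equal_categorize_transaction := by
  intro desc _
  unfold Spec_categorize_transaction categorize_transaction categorize_transaction_alt
  dsimp only
  have c0 := pvCond_iff (PySem.Str.lower desc) _ 0 rfl
  have c1 := pvCond_iff (PySem.Str.lower desc) _ 1 rfl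
  have c2 := pvCond_iff (PySem.Str.lower desc) _ 2 rfl
  have c3 := pvCond_iff (PySem.Str.lower desc) _ 3 rfl
  have c4 := pvCond_iff (PySem.Str.lower desc) _ 4 rfl
  have c5 := pvCond_iff (PySem.Str.lower desc) _ 5 rfl
  have c6 := pvCond_iff (PySem.Str.lower desc) _ 6 rfl
  have c7 := pvCond_iff (PySem.Str.lower desc) _ 7 rfl
  have c8 := pvCond_iff (PySem.Str.lower desc) _ 8 rfl
  set l := (PySem.Str.lower desc).toList with hl
  have hB : (if pvScan l pvCategories.length < pvCategories.length
      then pvCategories.getD (pvScan l pvCategories.length) "Other" else "Other")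
      = pvCategories.getD (pvScan l 9) "Other" := by
    show (if pvScan l 9 < 9 then pvCategories.getD (pvScan l 9) "Other" else "Other") = _
    split
    · rfl
    · next h =>
        have hle := pvScan_le l 9
        have h9 : pvScan l 9 = 9 := by omega
        rw [h9]; rfl
  rw [hB]
  split_ifs with h0 h1 h2 h3 h4 h5 h6 h7 h8
  · rw [pvScan_eq l 0 (by omega) (c0.mp h0) (by intro p hp; omega)]; rfl
  · rw [pvScan_eq l 1 (by omega) (c1.mp h1) (by
      intro p hp; interval_cases p
      · exact fun h => h0 (c0.mpr h))]; rfl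
  · rw [pvScan_eq l 2 (by omega) (c2.mp h2) (by
      intro p hp; interval_cases p
      · exact fun h => h0 (c0.mpr h)
      · exact fun h => h1 (c1.mpr h))]; rfl
  · rw [pvScan_eq l 3 (by omega) (c3.mp h3) (by
      intro p hp; interval_cases p
      · exact fun h => h0 (c0.mpr h)
      · exact fun h => h1 (c1.mpr h)
      · exact fun h => h2 (c2.mpr h))]; rfl
  · rw [pvScan_eq l 4 (by omega) (c4.mp h4) (by
      intro p hp; interval_cases p
      · exact fun h => h0 (c0.mpr h)
      · exact fun h => h1 (c1.mpr h)
      · exact fun h => h2 (c2.mpr h)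
      · exact fun h => h3 (c3.mpr h))]; rfl
  · rw [pvScan_eq l 5 (by omega) (c5.mp h5) (by
      intro p hp; interval_cases p
      · exact fun h => h0 (c0.mpr h)
      · exact fun h => h1 (c1.mpr h)
      · exact fun h => h2 (c2.mpr h)
      · exact fun h => h3 (c3.mpr h)
      · exact fun h => h4 (c4.mpr h))]; rfl
  · rw [pvScan_eq l 6 (by omega) (c6.mp h6) (by
      intro p hp; interval_cases p
      · exact fun h => h0 (c0.mpr h)
      · exact fun h => h1 (c1.mpr h)
      · exact fun h => h2 (c2.mpr h)
      · exact fun h => h3 (c3.mpr h)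
      · exact fun h => h4 (c4.mpr h)
      · exact fun h => h5 (c5.mpr h))]; rfl
  · rw [pvScan_eq l 7 (by omega) (c7.mp h7) (by
      intro p hp; interval_cases p
      · exact fun h => h0 (c0.mpr h)
      · exact fun h => h1 (c1.mpr h)
      · exact fun h => h2 (c2.mpr h)
      · exact fun h => h3 (c3.mpr h)
      · exact fun h => h4 (c4.mpr h)
      · exact fun h => h5 (c5.mpr h)
      · exact fun h => h6 (c6.mpr h))]; rfl
  · rw [pvScan_eq l 8 (by omega) (c8.mp h8) (by
      intro p hp; interval_cases p
      · exact fun h => h0 (c0.mpr h)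
      · exact fun h => h1 (c1.mpr h)
      · exact fun h => h2 (c2.mpr h)
      · exact fun h => h3 (c3.mpr h)
      · exact fun h => h4 (c4.mpr h)
      · exact fun h => h5 (c5.mpr h)
      · exact fun h => h6 (c6.mpr h)
      · exact fun h => h7 (c7.mpr h))]; rfl
  · rw [pvScan_eq_nine l (by
      intro p hp; interval_cases p
      · exact fun h => h0 (c0.mpr h)
      · exact fun h => h1 (c1.mpr h)
      · exact fun h => h2 (c2.mpr h)
      · exact fun h => h3 (c3.mpr h)
      · exact fun h => h4 (c4.mpr h)
      · exact fun h => h5 (c5.mpr h)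
      · exact fun h => h6 (c6.mpr h)
      · exact fun h => h7 (c7.mpr h)
      · exact fun h => h8 (c8.mpr h))]; rfl
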